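-- pv_equiv track=rewrite | github.com/Bahnschrift/aoc2020 | bahnslib.py | split_join
-- ===== SOURCE A (Python) =====
-- from typing import Dict, Iterable, List, Any, Type, Union, Tuple
--
-- def split_join(thing: Iterable[str], value: str, join_with: str) -> List[str]:
--     out = []
--     new = []
--     for item in thing:
--         if item == value:
--             out += [join_with.join(new)]
--             new = []
--         else:
--             new += [item]
--     if new:  # Prevents trailing empty lists if initial iterable ended with the target value
--         out += [join_with.join(new)]
--     return out
-- ===== SOURCE B (Python) =====
-- def split_join(thing, value, join_with):
--     def go(items):
--         if value in items:
--             j = items.index(value)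
--             return [join_with.join(items[:j])] + go(items[j + 1:])
--         return [join_with.join(items)] if items else []
--     return go(list(thing))
-- ===== Notes on version B (the rewrite author's own statement) =====
-- stated objective: alternative
-- what changed: Replaces A's single left-to-right accumulator loop by a recursive decomposition that splits off the prefix before the first delimiter (items.index) and recurses on the rest, emitting the tail join only when the tail is non-empty.
import Mathlib
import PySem

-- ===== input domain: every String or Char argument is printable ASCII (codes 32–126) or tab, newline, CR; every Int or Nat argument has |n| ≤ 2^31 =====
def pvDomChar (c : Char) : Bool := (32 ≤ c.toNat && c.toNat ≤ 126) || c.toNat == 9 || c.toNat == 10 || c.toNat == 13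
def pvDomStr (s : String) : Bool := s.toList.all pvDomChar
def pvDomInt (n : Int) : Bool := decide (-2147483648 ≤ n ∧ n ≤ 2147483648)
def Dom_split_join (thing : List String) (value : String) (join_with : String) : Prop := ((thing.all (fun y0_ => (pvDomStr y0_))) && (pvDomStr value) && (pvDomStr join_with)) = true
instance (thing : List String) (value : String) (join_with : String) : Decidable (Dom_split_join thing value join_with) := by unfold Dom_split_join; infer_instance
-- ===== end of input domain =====

-- B replaces A's accumulator loop by recursion that splits off the segment before the
-- first delimiter and recurses on the remainder (objective: alternative decomposition).

-- ===== PORT A =====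
-- A's for-loop over `thing` with state (out, new), then the trailing `if new:` append.
def sjLoop (value join_with : String) (out new : List String) : List String → List String
  | [] => if new.isEmpty then out else out ++ [PySem.Str.join join_with new]
  | item :: rest =>
      if item == value then
        sjLoop value join_with (out ++ [PySem.Str.join join_with new]) [] rest
      else
        sjLoop value join_with out (new ++ [item]) rest

def split_join (thing : List String) (value : String) (join_with : String) : List String :=
  sjLoop value join_with [] [] thing

-- ===== PORT B =====
-- Source B's go: if value occurs, emit the join of the prefix before its first occurrence
-- and recurse on the suffix after it; otherwise emit the join of the whole (non-empty) list.
def sjGo (value join_with : String) (xs : List String) : List String :=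
  match _h : xs.dropWhile (fun s => !(s == value)) with
  | [] => if xs.isEmpty then [] else [PySem.Str.join join_with xs]
  | _ :: rest =>
      PySem.Str.join join_with (xs.takeWhile (fun s => !(s == value))) :: sjGo value join_with rest
termination_by xs.length
decreasing_by
  have h1 : (xs.dropWhile (fun s => !(s == value))).length ≤ xs.length :=
    xs.length_dropWhile_le _
  simp_all

def split_join_alt (thing : List String) (value : String) (join_with : String) : List String :=
  sjGo value join_with thing

-- ===== PRECONDITION & SPEC =====
def Spec_split_join (thing : List String) (value : String) (join_with : String) (out : List String) : Prop := out = split_join_alt thing value join_with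
instance (thing : List String) (value : String) (join_with : String) (out : List String) : Decidable (Spec_split_join thing value join_with out) := by unfold Spec_split_join; infer_instance

-- ===== CLAIM (what is proved, stated in full; the proofs are below) =====
def Claim_equal_split_join : Prop := ∀ (thing : List String) (value : String) (join_with : String), Dom_split_join thing value join_with → Spec_split_join thing value join_with (split_join thing value join_with)

-- ===== LEMMAS AND PROOFS =====

theorem dw_all {α} (p : α → Bool) (as bs : List α) (h : ∀ a ∈ as, p a = true) :
    (as ++ bs).dropWhile p = bs.dropWhile p := by
  induction as with
  | nil => rfl
  | cons a as ih =>
      simp [h a (by simp)]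
      exact ih (fun a ha => h a (by simp [ha]))

theorem tw_all {α} (p : α → Bool) (as bs : List α) (h : ∀ a ∈ as, p a = true) :
    (as ++ bs).takeWhile p = as ++ bs.takeWhile p := by
  induction as with
  | nil => rfl
  | cons a as ih =>
      simp [h a (by simp)]
      exact ih (fun a ha => h a (by simp [ha]))

theorem sjLoop_out (value join_with : String) (out new xs : List String) :
    sjLoop value join_with out new xs = out ++ sjLoop value join_with [] new xs := by
  induction xs generalizing out new with
  | nil => simp [sjLoop]; split <;> simp
  | cons item rest ih =>
      simp only [sjLoop]
      by_cases hi : (item == value) = true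
      · simp only [hi, if_true, List.nil_append]
        rw [ih (out ++ [PySem.Str.join join_with new]), ih [PySem.Str.join join_with new]]
        simp
      · simp only [hi]
        exact ih out (new ++ [item])

theorem sjGo_drop_nil (value join_with : String) (xs : List String)
    (hd : xs.dropWhile (fun s => !(s == value)) = []) :
    sjGo value join_with xs = if xs.isEmpty then [] else [PySem.Str.join join_with xs] := by
  unfold sjGo
  split <;> simp_all

theorem sjGo_drop_cons (value join_with : String) (xs : List String) (y : String) (rest : List String)
    (hd : xs.dropWhile (fun s => !(s == value)) = y :: rest) :
    sjGo value join_with xs =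
      PySem.Str.join join_with (xs.takeWhile (fun s => !(s == value))) :: sjGo value join_with rest := by
  rw [sjGo.eq_def]
  split <;> simp_all

theorem sjLoop_eq_sjGo (value join_with : String) (xs new : List String)
    (h : ∀ a ∈ new, (a == value) = false) :
    sjLoop value join_with [] new xs = sjGo value join_with (new ++ xs) := by
  induction xs generalizing new with
  | nil =>
      have hd : (new ++ ([] : List String)).dropWhile (fun s => !(s == value)) = [] := by
        simp [List.dropWhile_eq_nil_iff]
        intro a ha; simpa using h a ha
      rw [sjGo_drop_nil _ _ _ hd]
      simp [sjLoop]
  | cons item rest ih =>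
      have hp : ∀ a ∈ new, ((fun s => !(s == value)) a) = true := by
        intro a ha; simp [h a ha]
      by_cases hi : (item == value) = true
      · have hd : (new ++ item :: rest).dropWhile (fun s => !(s == value)) = item :: rest := by
          rw [dw_all _ new _ hp]
          simp [List.dropWhile, hi]
        have ht : (new ++ item :: rest).takeWhile (fun s => !(s == value)) = new := by
          rw [tw_all _ new _ hp]
          simp [List.takeWhile, hi]
        rw [sjGo_drop_cons _ _ _ _ _ hd, ht]
        simp only [sjLoop, hi, if_true]
        rw [sjLoop_out]
        have h0 := ih [] (by simp)
        simp at h0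
        simp [h0]
      · have hn : ∀ a ∈ new ++ [item], (a == value) = false := by
          intro a ha
          rcases List.mem_append.mp ha with h1 | h1
          · exact h a h1
          · simp at h1; subst h1; simpa using hi
        simp only [sjLoop, hi]
        rw [ih (new ++ [item]) hn]
        simp

-- ===== VERDICT (by name: the statement is the Claim_ definition above) =====
theorem split_join_spec : Claim_equal_split_join := by
  intro thing value join_with _
  unfold Spec_split_join split_join split_join_alt
  simpa using sjLoop_eq_sjGo value join_with thing [] (by simp)
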